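-- pv_equiv track=rewrite | github.com/israeljbsilva/one4-technical-challenge | core/duplicates_report.py | group_process_number_by_dates
-- ===== SOURCE A (Python) =====
-- from typing import Optional
--
-- def group_process_number_by_dates(diaries_separated_by_date: dict) -> Optional[dict]:
--     process_number_by_dates = {}
--     for availability_date in diaries_separated_by_date:
--         for process_number in diaries_separated_by_date[availability_date]:
--             if process_number not in process_number_by_dates:
--                 process_number_by_dates[process_number] = [availability_date]
--             else:
--                 process_number_by_dates[process_number].append(availability_date)
--
--     _remove_non_repeating_items(process_number_by_dates)
--     return process_number_by_dates
--
-- def _remove_non_repeating_items(process_number_by_dates: dict) -> None: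
--     for process_number in list(process_number_by_dates):
--         if len(process_number_by_dates[process_number]) == 1:
--             process_number_by_dates.pop(process_number)
-- ===== SOURCE B (Python) =====
-- from typing import Optional
--
--
-- def group_process_number_by_dates(diaries_separated_by_date: dict) -> Optional[dict]:
--     # First pass: count total appearances of each process number.
--     counts = {}
--     for availability_date in diaries_separated_by_date:
--         for process_number in diaries_separated_by_date[availability_date]:
--             counts[process_number] = counts.get(process_number, 0) + 1
--     # Second pass: collect dates only for process numbers appearing more than once.
--     result = {}
--     for availability_date in diaries_separated_by_date:
--         for process_number in diaries_separated_by_date[availability_date]: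
--             if counts[process_number] > 1:
--                 result.setdefault(process_number, []).append(availability_date)
--     return result
-- ===== Notes on version B (the rewrite author's own statement) =====
-- stated objective: alternative
-- what changed: B first builds a count dict of total appearances per process number, then in a second pass appends dates only for processes with count > 1, instead of building the full date lists for every process and then deleting the singleton entries afterwards.
import Mathlib
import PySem

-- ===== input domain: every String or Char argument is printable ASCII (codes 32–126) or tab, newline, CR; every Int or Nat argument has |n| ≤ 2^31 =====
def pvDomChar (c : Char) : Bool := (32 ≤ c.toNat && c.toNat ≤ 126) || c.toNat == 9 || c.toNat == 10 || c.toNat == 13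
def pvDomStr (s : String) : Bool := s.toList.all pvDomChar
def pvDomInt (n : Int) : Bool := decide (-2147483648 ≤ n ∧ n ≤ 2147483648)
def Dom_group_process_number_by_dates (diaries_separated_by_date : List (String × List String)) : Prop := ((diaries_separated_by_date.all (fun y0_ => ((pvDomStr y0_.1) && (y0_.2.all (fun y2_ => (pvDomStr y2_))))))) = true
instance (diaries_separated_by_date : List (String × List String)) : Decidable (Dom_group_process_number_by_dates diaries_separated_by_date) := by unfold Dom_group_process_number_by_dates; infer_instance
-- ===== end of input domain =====

-- ===== PORT A =====
-- B differs from A by counting appearances first and only collecting dates for repeated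
-- process numbers, instead of collecting all date lists and deleting singleton entries (objective: alternative).
-- helper: transliteration of _remove_non_repeating_items (mutating pop -> fold over the key list)
def pvRemoveNonRepeating (d : PySem.Dict String (List String)) : PySem.Dict String (List String) :=
  d.keys.foldl (fun acc k => if (acc.getD k []).length == 1 then acc.erase k else acc) d

def group_process_number_by_dates (diaries_separated_by_date : List (String × List String)) : Option (List (String × List String)) :=
  let process_number_by_dates : PySem.Dict String (List String) :=
    diaries_separated_by_date.foldl (fun acc pr =>
      pr.2.foldl (fun acc p =>
        if !(acc.contains p) then acc.insert p [pr.1]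
        else acc.modify p [] (fun l => l ++ [pr.1])) acc) PySem.Dict.empty
  some (pvRemoveNonRepeating process_number_by_dates).items

-- ===== PORT B =====
def group_process_number_by_dates_alt (diaries_separated_by_date : List (String × List String)) : Option (List (String × List String)) :=
  let counts : PySem.Dict String Int :=
    diaries_separated_by_date.foldl (fun c pr =>
      pr.2.foldl (fun c p => c.insert p (c.getD p 0 + 1)) c) PySem.Dict.empty
  let result : PySem.Dict String (List String) :=
    diaries_separated_by_date.foldl (fun r pr =>
      pr.2.foldl (fun r p =>
        if counts.getD p 0 > 1 then r.modify p [] (fun l => l ++ [pr.1]) else r) r) PySem.Dict.empty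
  some result.items

-- ===== PRECONDITION & SPEC =====
def Spec_group_process_number_by_dates (diaries_separated_by_date : List (String × List String)) (out : Option (List (String × List String))) : Prop := out = group_process_number_by_dates_alt diaries_separated_by_date
instance (diaries_separated_by_date : List (String × List String)) (out : Option (List (String × List String))) : Decidable (Spec_group_process_number_by_dates diaries_separated_by_date out) := by unfold Spec_group_process_number_by_dates; infer_instance

-- ===== CLAIM (what is proved, stated in full; the proofs are below) =====
def Claim_equal_group_process_number_by_dates : Prop := ∀ (diaries_separated_by_date : List (String × List String)), Dom_group_process_number_by_dates diaries_separated_by_date → Spec_group_process_number_by_dates diaries_separated_by_date (group_process_number_by_dates diaries_separated_by_date)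

-- ===== LEMMAS AND PROOFS =====

-- the nested (process_number, availability_date) pairs in traversal order
def pvPairs (d : List (String × List String)) : List (String × String) :=
  d.flatMap (fun pr => pr.2.map (fun p => (p, pr.1)))

-- flattening either port's nested loop into one fold over pvPairs
theorem pv_nested_foldl {alpha : Type} (g : alpha → String × String → alpha) :
    ∀ (d : List (String × List String)) (init : alpha),
      d.foldl (fun acc pr => pr.2.foldl (fun acc p => g acc (p, pr.1)) acc) init
        = (pvPairs d).foldl g init := by
  intro d
  induction d with
  | nil => intro init; simp [pvPairs]
  | cons hd tl ih =>
      intro init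
      simp only [List.foldl_cons, pvPairs, List.flatMap_cons, List.foldl_append, List.foldl_map]
      rw [← pvPairs, ih]

-- A's insert/append branch is a single modify
theorem pv_stepA_eq (acc : PySem.Dict String (List String)) (q : String × String) :
    (if !(acc.contains q.1) then acc.insert q.1 [q.2]
     else acc.modify q.1 [] (fun l => l ++ [q.2]))
      = acc.modify q.1 [] (fun l => l ++ [q.2]) := by
  by_cases h : acc.contains q.1
  · simp [h]
  · simp only [h]
    rw [PySem.Dict.modify, PySem.Dict.getD_of_not_contains _ _ (by simpa using h)]
    simp


-- keys of a dict stay Nodup after erase (erase filters the item list)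
theorem pv_nodup_keys_erase (d : PySem.Dict String (List String)) (k : String)
    (h : d.keys.Nodup) : (d.erase k).keys.Nodup := by
  have hsub : ((d.items.filter (fun p => !(p.1 == k))).map Prod.fst).Sublist (d.items.map Prod.fst) :=
    (List.filter_sublist).map _
  exact hsub.nodup h

-- the key-removal loop of _remove_non_repeating_items, characterised as one filter
theorem pv_prune_go :
    ∀ (ks : List String) (acc : PySem.Dict String (List String)),
      acc.keys.Nodup →
      (ks.foldl (fun acc k => if (acc.getD k []).length == 1 then acc.erase k else acc) acc).items
        = acc.items.filter (fun pr => !(decide (pr.1 ∈ ks) && (pr.2.length == 1))) := by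
  intro ks
  induction ks with
  | nil => intro acc _; simp
  | cons k ks ih =>
      intro acc hnd
      simp only [List.foldl_cons]
      by_cases h : ((acc.getD k []).length == 1) = true
      · rw [if_pos h, ih _ (pv_nodup_keys_erase _ _ hnd)]
        have herase : (acc.erase k).items = acc.items.filter (fun p => !(p.1 == k)) := rfl
        rw [herase, List.filter_filter]
        apply List.filter_congr
        intro pr hpr
        by_cases hk : pr.1 = k
        · have : pr.2 = acc.getD k [] := by
            subst hk
            exact (PySem.Dict.getD_of_mem_items _ hpr hnd []).symm
          subst hk
          simp [List.mem_cons, ← this] at h ⊢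
          simp [h]
        · simp [List.mem_cons, hk]
      · rw [if_neg h, ih _ hnd]
        apply List.filter_congr
        intro pr hpr
        by_cases hk : pr.1 = k
        · have : pr.2 = acc.getD k [] := by
            subst hk
            exact (PySem.Dict.getD_of_mem_items _ hpr hnd []).symm
          subst hk
          simp only [List.mem_cons] at h ⊢
          rw [← this] at h
          simp [h]
        · simp [List.mem_cons, hk]

-- lookup agreement between a dict and its key-filtered version
theorem pv_getD_filter (C : String → Bool) (accF acc : PySem.Dict String (List String))
    (hnd : accF.keys.Nodup) (hacc : acc.items = accF.items.filter (fun pr => C pr.1))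
    (p : String) (hC : C p = true) : acc.getD p [] = accF.getD p [] := by
  have hndacc : acc.keys.Nodup := by
    have hsub : ((accF.items.filter (fun pr => C pr.1)).map Prod.fst).Sublist (accF.items.map Prod.fst) :=
      (List.filter_sublist).map _
    have : acc.keys = (accF.items.filter (fun pr => C pr.1)).map Prod.fst := by
      simp [PySem.Dict.keys, hacc]
    rw [this]; exact hsub.nodup hnd
  cases hget : accF.get? p with
  | some v =>
      have hmem : (p, v) ∈ accF.items := PySem.Dict.mem_items_of_get?_eq_some _ hget
      have hmem' : (p, v) ∈ acc.items := by
        rw [hacc]; exact List.mem_filter.mpr ⟨hmem, by simpa using hC⟩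
      rw [PySem.Dict.getD_of_mem_items _ hmem' hndacc, PySem.Dict.getD_of_mem_items _ hmem hnd]
  | none =>
      have hnot : p ∉ accF.keys := (PySem.Dict.get?_eq_none_iff_not_mem_keys _ _).mp hget
      have hnot' : p ∉ acc.keys := by
        intro hmem
        apply hnot
        have : acc.keys = (accF.items.filter (fun pr => C pr.1)).map Prod.fst := by
          simp [PySem.Dict.keys, hacc]
        rw [this] at hmem
        obtain ⟨pr, hpr, hfst⟩ := List.mem_map.mp hmem
        have := (List.mem_filter.mp hpr).1
        subst hfst
        exact List.mem_map.mpr ⟨pr, this, rfl⟩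
      rw [PySem.Dict.getD_of_not_contains _ _ (by
            rw [PySem.Dict.contains_eq_decide_mem_keys]; simpa using hnot'),
          PySem.Dict.getD_of_not_contains _ _ (by
            rw [PySem.Dict.contains_eq_decide_mem_keys]; simpa using hnot)]

-- contains agreement for keys the filter keeps
theorem pv_contains_filter (C : String → Bool) (accF acc : PySem.Dict String (List String))
    (hacc : acc.items = accF.items.filter (fun pr => C pr.1))
    (p : String) (hC : C p = true) : acc.contains p = accF.contains p := by
  rw [PySem.Dict.contains_eq_decide_mem_keys, PySem.Dict.contains_eq_decide_mem_keys]
  simp only [PySem.Dict.keys, hacc, decide_eq_decide]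
  constructor
  · intro hmem
    obtain ⟨pr, hpr, hfst⟩ := List.mem_map.mp hmem
    exact List.mem_map.mpr ⟨pr, (List.mem_filter.mp hpr).1, hfst⟩
  · intro hmem
    obtain ⟨pr, hpr, hfst⟩ := List.mem_map.mp hmem
    refine List.mem_map.mpr ⟨pr, List.mem_filter.mpr ⟨hpr, ?_⟩, hfst⟩
    subst hfst; simpa using hC

-- filtering by a key predicate commutes with the value-overwrite map of insert
theorem pv_filter_map_g (C : String → Bool) (p : String) (w : List String)
    (l : List (String × List String)) :
    (l.map (fun pr => if pr.1 == p then (p, w) else pr)).filter (fun pr => C pr.1)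
      = (l.filter (fun pr => C pr.1)).map (fun pr => if pr.1 == p then (p, w) else pr) := by
  rw [List.filter_map]
  congr 1
  apply List.filter_congr
  intro pr _
  by_cases hk : pr.1 = p
  · simp [hk]
  · simp [hk]

-- the overwrite map is the identity on entries whose key the (false-at-p) predicate keeps
theorem pv_map_g_id (C : String → Bool) (p : String) (w : List String)
    (l : List (String × List String)) (hCp : C p = false) :
    (l.filter (fun pr => C pr.1)).map (fun pr => if pr.1 == p then (p, w) else pr)
      = l.filter (fun pr => C pr.1) := by
  rw [List.map_congr_left, List.map_id']
  intro pr hpr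
  have hCpr := (List.mem_filter.mp hpr).2
  by_cases hk : pr.1 = p
  · rw [hk, hCp] at hCpr; exact absurd hCpr (by simp)
  · simp [hk]

-- B's guarded collection loop equals the key-filtered unguarded collection loop
theorem pv_build_go (C : String → Bool) :
    ∀ (l : List (String × String)) (accF acc : PySem.Dict String (List String)),
      accF.keys.Nodup →
      acc.items = accF.items.filter (fun pr => C pr.1) →
      (l.foldl (fun r q => if C q.1 then r.modify q.1 [] (fun v => v ++ [q.2]) else r) acc).items
        = (l.foldl (fun a q => a.modify q.1 [] (fun v => v ++ [q.2])) accF).items.filter (fun pr => C pr.1) := by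
  intro l
  induction l with
  | nil => intro accF acc _ hacc; simpa using hacc
  | cons q l ih =>
      intro accF acc hnd hacc
      simp only [List.foldl_cons]
      have hndF' : (accF.modify q.1 [] (fun v => v ++ [q.2])).keys.Nodup := by
        rw [PySem.Dict.modify]
        exact PySem.Dict.nodup_keys_insert _ _ _ hnd
      by_cases hC : C q.1 = true
      · rw [if_pos hC]
        apply ih _ _ hndF'
        have hgd := pv_getD_filter C accF acc hnd hacc q.1 hC
        have hcon := pv_contains_filter C accF acc hacc q.1 hC
        rw [PySem.Dict.modify, PySem.Dict.modify, hgd]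
        rw [PySem.Dict.items_insert, PySem.Dict.items_insert, hcon]
        by_cases hc : accF.contains q.1 = true
        · rw [if_pos hc, if_pos hc, hacc, pv_filter_map_g]
        · rw [if_neg hc, if_neg hc, hacc, List.filter_append]
          simp [hC]
      · rw [if_neg hC]
        apply ih _ _ hndF'
        rw [PySem.Dict.modify, PySem.Dict.items_insert]
        simp only [Bool.not_eq_true] at hC
        by_cases hc : accF.contains q.1 = true
        · rw [if_pos hc, pv_filter_map_g, pv_map_g_id _ _ _ _ hC, hacc]
        · rw [if_neg hc, List.filter_append, hacc]
          simp [hC]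

-- ===== VERDICT (by name: the statement is the Claim_ definition above) =====
theorem group_process_number_by_dates_spec : Claim_equal_group_process_number_by_dates := by
  intro d _
  unfold Spec_group_process_number_by_dates
  simp only [group_process_number_by_dates, group_process_number_by_dates_alt]
  -- flatten A's nested build loop and normalise its step to a single modify
  have hA : d.foldl (fun acc pr =>
        pr.2.foldl (fun acc p =>
          if !(acc.contains p) then acc.insert p [pr.1]
          else acc.modify p [] (fun l => l ++ [pr.1])) acc) PySem.Dict.empty
      = (pvPairs d).foldl (fun acc q =>
          if !(acc.contains q.1) then acc.insert q.1 [q.2]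
          else acc.modify q.1 [] (fun l => l ++ [q.2])) PySem.Dict.empty :=
    pv_nested_foldl (fun acc q =>
          if !(acc.contains q.1) then acc.insert q.1 [q.2]
          else acc.modify q.1 [] (fun l => l ++ [q.2])) d PySem.Dict.empty
  rw [hA]
  simp only [pv_stepA_eq]
  -- the fully-built dict
  set fullF : PySem.Dict String (List String) :=
    (pvPairs d).foldl (fun acc q => acc.modify q.1 [] (fun l => l ++ [q.2])) PySem.Dict.empty with hfullF
  have hndF : fullF.keys.Nodup := by
    have := PySem.Dict.nodup_keys_foldl_insert_key (pvPairs d) Prod.fst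
      (fun a q => a.getD q.1 [] ++ [q.2]) PySem.Dict.empty (by simp)
    exact this
  have hkeysF : fullF.keys = PySem.Set.ofList ((pvPairs d).map Prod.fst) := by
    have := PySem.Dict.keys_foldl_insert_key (pvPairs d) Prod.fst
      (fun a q => a.getD q.1 [] ++ [q.2]) PySem.Dict.empty
    rw [hfullF]
    refine this.trans ?_
    rw [PySem.Dict.keys_empty]
    exact PySem.Set.update_empty _
  have hgdF : ∀ p, fullF.getD p [] = ((pvPairs d).filter (fun q => q.1 == p)).map (fun q => q.2) := by
    intro p
    have := PySem.Dict.getD_foldl_modify_append (pvPairs d) PySem.Dict.empty p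
    rw [hfullF]
    exact this.trans (by simp [PySem.Dict.getD_empty])
  -- A's result: prune the singleton entries
  rw [pvRemoveNonRepeating, pv_prune_go fullF.keys fullF hndF]
  -- B's counts dict counts appearances
  have hcnt : d.foldl (fun c pr =>
        pr.2.foldl (fun c p => c.insert p (c.getD p 0 + 1)) c)
        (PySem.Dict.empty : PySem.Dict String Int)
      = (pvPairs d).foldl (fun c q => c.insert q.1 (c.getD q.1 0 + 1)) PySem.Dict.empty :=
    pv_nested_foldl (fun (c : PySem.Dict String Int) q => c.insert q.1 (c.getD q.1 0 + 1)) d PySem.Dict.empty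
  rw [hcnt]
  set cnts : PySem.Dict String Int :=
    (pvPairs d).foldl (fun c q => c.insert q.1 (c.getD q.1 0 + 1)) PySem.Dict.empty with hcnts
  have hgdC : ∀ p, cnts.getD p 0 = (((pvPairs d).map Prod.fst).count p : Int) := by
    intro p
    have hmap : cnts = ((pvPairs d).map Prod.fst).foldl
        (fun c x => c.insert x (c.getD x 0 + 1)) PySem.Dict.empty := by
      rw [hcnts, List.foldl_map]
    rw [hmap, PySem.Dict.getD_foldl_insert_add_one]
    simp [PySem.Dict.getD_empty]
  -- flatten B's guarded collection loop
  have hB : d.foldl (fun r pr =>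
        pr.2.foldl (fun r p =>
          if cnts.getD p 0 > 1 then r.modify p [] (fun l => l ++ [pr.1]) else r) r) PySem.Dict.empty
      = (pvPairs d).foldl (fun r q =>
          if cnts.getD q.1 0 > 1 then r.modify q.1 [] (fun l => l ++ [q.2]) else r) PySem.Dict.empty :=
    pv_nested_foldl (fun r q =>
          if cnts.getD q.1 0 > 1 then r.modify q.1 [] (fun l => l ++ [q.2]) else r) d PySem.Dict.empty
  rw [hB]
  have hBfilter : ((pvPairs d).foldl (fun r q =>
        if cnts.getD q.1 0 > 1 then r.modify q.1 [] (fun l => l ++ [q.2]) else r) PySem.Dict.empty).items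
      = fullF.items.filter (fun pr => decide (cnts.getD pr.1 0 > 1)) := by
    have := pv_build_go (fun p => decide (cnts.getD p 0 > 1)) (pvPairs d)
      PySem.Dict.empty PySem.Dict.empty (by simp) (by rfl)
    simp only [decide_eq_true_eq] at this
    rw [hfullF]
    exact this
  rw [hBfilter]
  -- the two filters agree entry by entry
  congr 1
  apply List.filter_congr
  intro pr hpr
  have hk : pr.1 ∈ fullF.keys := by
    rcases pr with ⟨k, v⟩
    exact PySem.Dict.mem_keys_of_mem_items _ hpr
  have hv : pr.2 = fullF.getD pr.1 [] := by
    rcases pr with ⟨k, v⟩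
    exact (PySem.Dict.getD_of_mem_items _ hpr hndF []).symm
  have hlen : pr.2.length = ((pvPairs d).map Prod.fst).count pr.1 := by
    rw [hv, hgdF, List.length_map, List.count, List.countP_map]
    rw [List.countP_eq_length_filter]
    congr 1
  have hpos : 0 < ((pvPairs d).map Prod.fst).count pr.1 := by
    apply List.count_pos_iff.mpr
    rw [hkeysF] at hk
    exact (PySem.Set.mem_ofList _ _).mp hk
  simp only [hk, decide_true, Bool.true_and, hgdC, hlen]
  rcases h1 : ((pvPairs d).map Prod.fst).count pr.1 with _ | n
  · rw [h1] at hpos; omega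
  · by_cases hn : n = 0
    · subst hn; simp
    · simp [hn, Nat.pos_of_ne_zero hn]
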